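-- pv_equiv track=rewrite | github.com/Dantesto/Control-of-a-two-wheeled-robot | Modeling.py | RecoverEdgeWay
-- ===== SOURCE A (Python) =====
-- def RecoverEdgeWay(g, prev_vertex, i_i, i_g):
--     edges_ind = [] #Индексы ребер на пути
--     i_next = i_g
--     i_cur = prev_vertex[i_g]
--     while (i_cur != -1):
--         for i in range(len(g[i_cur][1])):
--             if (g[i_cur][1][i][0] == i_next):
--                 edges_ind.append(i)
--                 break
--         i_next = i_cur
--         i_cur = prev_vertex[i_cur]
--     edges_ind.reverse()
--     return edges_ind
-- ===== SOURCE B (Python) =====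
-- def RecoverEdgeWay(g, prev_vertex, i_i, i_g):
--     # Phase 1: reconstruct the vertex path (goal first, then follow prev links), then reverse.
--     path = [i_g]
--     v = prev_vertex[i_g]
--     while v != -1:
--         path.append(v)
--         v = prev_vertex[v]
--     path.reverse()
--     # Phase 2: walk consecutive pairs forward, looking up each edge index.
--     edges = []
--     for u, w in zip(path, path[1:]):
--         for idx, e in enumerate(g[u][1]):
--             if e[0] == w:
--                 edges.append(idx)
--                 break
--     return edges
-- ===== Notes on version B (the rewrite author's own statement) =====
-- stated objective: alternative
-- what changed: A interleaves backward chain-following with edge lookup and reverses the edge list at the end; B first reconstructs the full vertex path, reverses it, and then in a separate forward pass over consecutive vertex pairs looks up each edge index, needing no final reverse.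
import Mathlib
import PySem

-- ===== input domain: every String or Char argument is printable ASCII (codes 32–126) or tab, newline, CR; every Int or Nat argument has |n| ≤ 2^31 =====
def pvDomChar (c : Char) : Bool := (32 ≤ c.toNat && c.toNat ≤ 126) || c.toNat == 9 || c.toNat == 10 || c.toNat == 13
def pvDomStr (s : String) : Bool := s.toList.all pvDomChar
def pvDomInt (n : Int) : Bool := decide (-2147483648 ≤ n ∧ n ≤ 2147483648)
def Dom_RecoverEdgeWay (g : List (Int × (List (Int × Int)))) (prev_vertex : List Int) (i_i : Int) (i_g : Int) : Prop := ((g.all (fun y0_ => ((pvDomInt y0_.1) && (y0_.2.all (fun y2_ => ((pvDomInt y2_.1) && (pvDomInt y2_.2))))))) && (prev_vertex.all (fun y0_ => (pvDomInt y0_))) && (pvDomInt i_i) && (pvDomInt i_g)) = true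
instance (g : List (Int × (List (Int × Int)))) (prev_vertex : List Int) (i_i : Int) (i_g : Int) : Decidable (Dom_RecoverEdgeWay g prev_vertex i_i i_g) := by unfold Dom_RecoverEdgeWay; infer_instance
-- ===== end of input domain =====

-- ===== PORT A =====
-- B changes the decomposition only (two-phase path reconstruction then forward edge lookup); same cost.
-- A-side inner loop: 'for i in range(len(row)): if row[i][0] == target: append i; break'
def pvScanA (row : List (Int × Int)) (target : Int) (i : Nat) : Option Int :=
  if h : i < row.length then
    if (row[i]).1 = target then some (i : Int) else pvScanA row target (i + 1)
  else none
termination_by row.length - i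

-- A's while loop: state (edges_ind, i_next, i_cur); fuel bounds the iterations (outside Pre_ A loops or raises)
def pvGoA (g : List (Int × (List (Int × Int)))) (prev_vertex : List Int) :
    Nat → List Int → Int → Int → List Int
  | 0, edges, _, _ => edges
  | fuel + 1, edges, i_next, i_cur =>
    if i_cur = -1 then edges
    else
      match PySem.List.pyGet? g i_cur, PySem.List.pyGet? prev_vertex i_cur with
      | some row, some p =>
        let edges' := match pvScanA row.2 i_next 0 with
          | some i => edges ++ [i]
          | none => edges
        pvGoA g prev_vertex fuel edges' i_cur p
      | _, _ => edges   -- IndexError in Python: outside Pre_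

def RecoverEdgeWay (g : List (Int × (List (Int × Int)))) (prev_vertex : List Int) (i_i : Int) (i_g : Int) : List Int :=
  match PySem.List.pyGet? prev_vertex i_g with
  | none => []   -- IndexError in Python: outside Pre_
  | some c0 => (pvGoA g prev_vertex (prev_vertex.length + 1) [] i_g c0).reverse

-- ===== PORT B =====
-- B-side inner loop: 'for idx, e in enumerate(g[u][1]): if e[0] == w: append idx; break'
def pvScanB (target : Int) : List (Int × Int) → Int → Option Int
  | [], _ => none
  | e :: rest, idx => if e.1 = target then some idx else pvScanB target rest (idx + 1)

-- B's phase-1 while loop: append v, follow prev link (fuel as above)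
def pvGoPath (prev_vertex : List Int) : Nat → List Int → Int → List Int
  | 0, path, _ => path
  | fuel + 1, path, v =>
    if v = -1 then path
    else
      match PySem.List.pyGet? prev_vertex v with
      | none => path   -- IndexError in Python: outside Pre_
      | some p => pvGoPath prev_vertex fuel (path ++ [v]) p

-- B's phase-2 body for one pair (u, w)
def pvStepB (g : List (Int × (List (Int × Int)))) (edges : List Int) (p : Int × Int) : List Int :=
  match PySem.List.pyGet? g p.1 with
  | none => edges   -- IndexError in Python: outside Pre_
  | some row =>
    match pvScanB p.2 row.2 0 with
    | some idx => edges ++ [idx]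
    | none => edges

def RecoverEdgeWay_alt (g : List (Int × (List (Int × Int)))) (prev_vertex : List Int) (i_i : Int) (i_g : Int) : List Int :=
  match PySem.List.pyGet? prev_vertex i_g with
  | none => []   -- IndexError in Python: outside Pre_
  | some v0 =>
    let path := (pvGoPath prev_vertex (prev_vertex.length + 1) [i_g] v0).reverse
    (path.zip path.tail).foldl (pvStepB g) []

-- ===== PRECONDITION & SPEC =====
-- one application of A's loop step on the current vertex: -1 is absorbing, an invalid index
-- (IndexError in Python, for prev_vertex or g) maps to none, otherwise follow the prev_vertex link
def pvStep (g : List (Int × (List (Int × Int)))) (prev_vertex : List Int) (v? : Option Int) : Option Int :=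
  match v? with
  | none => none
  | some v =>
    if v = -1 then some (-1)
    else
      match PySem.List.pyGet? g v, PySem.List.pyGet? prev_vertex v with
      | some _, some p => some p
      | _, _ => none

-- following the prev_vertex links from prev_vertex[i_g] reaches the sentinel -1 within length-many
-- steps, every visited vertex being a valid index of both prev_vertex and g — exactly the inputs on
-- which A returns (otherwise Python raises IndexError or, on a repeating chain, never terminates)
def Pre_RecoverEdgeWay (g : List (Int × (List (Int × Int)))) (prev_vertex : List Int) (i_i : Int) (i_g : Int) : Prop :=
  (pvStep g prev_vertex)^[prev_vertex.length + 1] (PySem.List.pyGet? prev_vertex i_g) = some (-1)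

instance (g : List (Int × (List (Int × Int)))) (prev_vertex : List Int) (i_i : Int) (i_g : Int) : Decidable (Pre_RecoverEdgeWay g prev_vertex i_i i_g) := by
  unfold Pre_RecoverEdgeWay; infer_instance

def pvWitness_RecoverEdgeWay : (List (Int × (List (Int × Int)))) × List Int × Int × Int :=
  ([(0, [(1, 5)]), (1, [])], [-1, 0], 0, 1)

def Spec_RecoverEdgeWay (g : List (Int × (List (Int × Int)))) (prev_vertex : List Int) (i_i : Int) (i_g : Int) (out : List Int) : Prop := out = RecoverEdgeWay_alt g prev_vertex i_i i_g
instance (g : List (Int × (List (Int × Int)))) (prev_vertex : List Int) (i_i : Int) (i_g : Int) (out : List Int) : Decidable (Spec_RecoverEdgeWay g prev_vertex i_i i_g out) := by unfold Spec_RecoverEdgeWay; infer_instance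

-- ===== CLAIM (what is proved, stated in full; the proofs are below) =====
def Claim_equal_RecoverEdgeWay : Prop := ∀ (g : List (Int × (List (Int × Int)))) (prev_vertex : List Int) (i_i : Int) (i_g : Int), Dom_RecoverEdgeWay g prev_vertex i_i i_g → Pre_RecoverEdgeWay g prev_vertex i_i i_g → Spec_RecoverEdgeWay g prev_vertex i_i i_g (RecoverEdgeWay g prev_vertex i_i i_g)

-- ===== LEMMAS AND PROOFS =====

-- the chain of visited vertices (with A's validity checks folded in)
def pvChain (g : List (Int × (List (Int × Int)))) (prev_vertex : List Int) : Nat → Int → List Int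
  | 0, _ => []
  | fuel + 1, v =>
    if v = -1 then []
    else
      match PySem.List.pyGet? g v, PySem.List.pyGet? prev_vertex v with
      | some _, some p => v :: pvChain g prev_vertex fuel p
      | _, _ => []

-- the chain as B's phase 1 sees it (no g checks)
def pvChainB (prev_vertex : List Int) : Nat → Int → List Int
  | 0, _ => []
  | fuel + 1, v =>
    if v = -1 then []
    else
      match PySem.List.pyGet? prev_vertex v with
      | none => []
      | some p => v :: pvChainB prev_vertex fuel p

-- the (at most one) edge index contributed by the pair (u, w)
def pvEdge (g : List (Int × (List (Int × Int)))) (u w : Int) : List Int :=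
  match PySem.List.pyGet? g u with
  | none => []
  | some row => (pvScanB w row.2 0).toList

-- A's accumulated edge list along a chain
def pvAacc (g : List (Int × (List (Int × Int)))) : List Int → Int → List Int
  | [], _ => []
  | c :: m, w => pvEdge g c w ++ pvAacc g m c

lemma pvScanA_eq (row : List (Int × Int)) (t : Int) :
    ∀ n i, row.length - i ≤ n → pvScanA row t i = pvScanB t (row.drop i) (i : Int) := by
  intro n
  induction n with
  | zero =>
    intro i hi
    have h : ¬ i < row.length := by omega
    rw [pvScanA, dif_neg h, List.drop_eq_nil_of_le (by omega), pvScanB]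
  | succ n ih =>
    intro i hi
    by_cases h : i < row.length
    · rw [pvScanA, dif_pos h, List.drop_eq_getElem_cons h, pvScanB]
      by_cases he : (row[i]).1 = t
      · simp [he]
      · simp only [he, if_false]
        have := ih (i + 1) (by omega)
        rw [this]; push_cast; ring_nf
    · rw [pvScanA, dif_neg h, List.drop_eq_nil_of_le (by omega), pvScanB]

lemma pvGoA_eq (g : List (Int × (List (Int × Int)))) (prev : List Int) :
    ∀ fuel edges w c, pvGoA g prev fuel edges w c = edges ++ pvAacc g (pvChain g prev fuel c) w := by
  intro fuel
  induction fuel with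
  | zero => intro edges w c; simp [pvGoA, pvChain, pvAacc]
  | succ fuel ih =>
    intro edges w c
    rw [pvGoA, pvChain]
    by_cases hc : c = -1
    · simp [hc, pvAacc]
    · simp only [hc, if_false]
      cases hg : PySem.List.pyGet? g c with
      | none => simp [pvAacc]
      | some row =>
        cases hp : PySem.List.pyGet? prev c with
        | none => simp [pvAacc]
        | some p =>
          simp only
          rw [ih]
          have hs : pvScanA row.2 w 0 = pvScanB w row.2 0 := by
            have := pvScanA_eq row.2 w row.2.length 0 (by omega)
            simpa using this
          have he : pvEdge g c w = (pvScanB w row.2 0).toList := by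
            simp [pvEdge, hg]
          rw [pvAacc, he, ← hs]
          cases pvScanA row.2 w 0 <;> simp

lemma pvGoPath_eq (prev : List Int) :
    ∀ fuel path v, pvGoPath prev fuel path v = path ++ pvChainB prev fuel v := by
  intro fuel
  induction fuel with
  | zero => intro path v; simp [pvGoPath, pvChainB]
  | succ fuel ih =>
    intro path v
    rw [pvGoPath, pvChainB]
    by_cases hv : v = -1
    · simp [hv]
    · simp only [hv, if_false]
      cases hp : PySem.List.pyGet? prev v with
      | none => simp
      | some p => simp [ih]

lemma pvStep_none (g : List (Int × (List (Int × Int)))) (prev : List Int) (n : Nat) :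
    (pvStep g prev)^[n] none = none :=
  Function.iterate_fixed rfl n

lemma pvChain_eq_chainB (g : List (Int × (List (Int × Int)))) (prev : List Int) :
    ∀ fuel c, (pvStep g prev)^[fuel] (some c) = some (-1) →
      pvChain g prev fuel c = pvChainB prev fuel c := by
  intro fuel
  induction fuel with
  | zero => intro c _; rfl
  | succ fuel ih =>
    intro c h
    rw [Function.iterate_succ_apply] at h
    rw [pvChain, pvChainB]
    by_cases hc : c = -1
    · simp [hc]
    · simp only [pvStep, hc, if_false] at h
      cases hg : PySem.List.pyGet? g c with
      | none =>
        rw [hg] at h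
        cases PySem.List.pyGet? prev c <;> simp [pvStep_none] at h
      | some row =>
        rw [hg] at h
        cases hp : PySem.List.pyGet? prev c with
        | none => rw [hp] at h
        | some p => simp only [hp] at h ⊢; rw [ih p h]

-- consecutive pairs of a list
def pvPairs {α : Type} (xs : List α) : List (α × α) := xs.zip xs.tail

lemma pvPairs_snoc {α : Type} (Y : List α) (w d : α) (h : Y ≠ []) :
    pvPairs (Y ++ [w]) = pvPairs Y ++ [(Y.getLastD d, w)] := by
  induction Y with
  | nil => exact absurd rfl h
  | cons a Y ih =>
    cases Y with
    | nil => simp [pvPairs]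
    | cons b Y' =>
      have := ih (by simp)
      simp only [pvPairs, List.cons_append, List.tail_cons, List.zip_cons_cons] at this ⊢
      rw [this]; simp

lemma pvFold_acc (g : List (Int × (List (Int × Int)))) :
    ∀ (xs : List (Int × Int)) (acc : List Int),
      xs.foldl (pvStepB g) acc = acc ++ xs.foldl (pvStepB g) [] := by
  intro xs
  induction xs with
  | nil => simp
  | cons p xs ih =>
    intro acc
    have hstep : ∀ a, pvStepB g a p = a ++ pvEdge g p.1 p.2 := by
      intro a
      simp only [pvStepB, pvEdge]
      cases PySem.List.pyGet? g p.1 with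
      | none => simp
      | some row => rcases h2 : pvScanB p.2 row.2 0 with _ | idx <;> simp [h2]
    simp only [List.foldl_cons]
    rw [ih (pvStepB g acc p), ih (pvStepB g [] p), hstep, hstep]
    simp

lemma pvMain (g : List (Int × (List (Int × Int)))) :
    ∀ (L : List Int) (w : Int),
      (pvPairs ((w :: L).reverse)).foldl (pvStepB g) [] = (pvAacc g L w).reverse := by
  intro L
  induction L with
  | nil => intro w; simp [pvPairs, pvAacc]
  | cons c M ih =>
    intro w
    have hrev : (w :: c :: M).reverse = (c :: M).reverse ++ [w] := by simp
    have hne : (c :: M).reverse ≠ [] := by simp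
    have hlast : ((c :: M).reverse).getLastD w = c := by
      rw [show (c :: M).reverse = M.reverse ++ [c] by simp, List.getLastD_concat]
    rw [hrev, pvPairs_snoc _ w w hne, hlast, List.foldl_append]
    rw [pvFold_acc, ih c, pvAacc]
    have hstep : ∀ a, List.foldl (pvStepB g) a [(c, w)] = a ++ pvEdge g c w := by
      intro a
      simp only [List.foldl_cons, List.foldl_nil, pvStepB, pvEdge]
      cases PySem.List.pyGet? g c with
      | none => simp
      | some row => rcases h2 : pvScanB w row.2 0 with _ | idx <;> simp [h2]
    rw [hstep]
    have hrevE : (pvEdge g c w).reverse = pvEdge g c w := by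
      simp only [pvEdge]
      cases PySem.List.pyGet? g c with
      | none => simp
      | some row => rcases h2 : pvScanB w row.2 0 with _ | idx <;> simp [h2]
    rw [List.reverse_append, hrevE]
    simp

-- ===== VERDICT (by name: the statement is the Claim_ definition above) =====
theorem RecoverEdgeWay_spec : Claim_equal_RecoverEdgeWay := by
  intro g prev i_i i_g _ hpre
  unfold Spec_RecoverEdgeWay
  unfold Pre_RecoverEdgeWay at hpre
  unfold RecoverEdgeWay RecoverEdgeWay_alt
  cases hc0 : PySem.List.pyGet? prev i_g with
  | none => rw [hc0, pvStep_none] at hpre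
  | some c0 =>
    rw [hc0] at hpre
    simp only
    rw [pvGoA_eq, pvGoPath_eq, pvChain_eq_chainB g prev _ c0 hpre]
    rw [List.nil_append, ← pvMain g (pvChainB prev (prev.length + 1) c0) i_g]
    simp [pvPairs]
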